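-- pv_equiv track=rewrite | github.com/ORELASH/MDM | core/security_manager.py | validate_permission_string
-- ===== SOURCE A (Python) =====
-- def validate_permission_string(permission: str) -> bool:
--     """Validate permission string format"""
--     # Basic validation - should be in format "resource.action"
--     parts = permission.split('.')
--     if len(parts) != 2:
--         return False
--
--     resource, action = parts
--     if not resource or not action:
--         return False
--
--     # Check for valid characters
--     valid_chars = set('abcdefghijklmnopqrstuvwxyz0123456789_')
--     if not all(c in valid_chars for c in resource.lower()):
--         return False
--     if not all(c in valid_chars for c in action.lower()):
--         return False
--
--     return True
-- ===== SOURCE B (Python) =====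
-- def validate_permission_string(permission: str) -> bool:
--     """Validate permission string format ("resource.action") in one pass.
--
--     Single state-machine scan over the lowercased string instead of
--     split + per-call set construction + two membership scans (an
--     alternative decomposition, not claimed faster).
--     States: 0 = need first resource char, 1 = in resource,
--             2 = need first action char,  3 = in action.
--     """
--     state = 0
--     for c in permission.lower():
--         if 'a' <= c <= 'z' or '0' <= c <= '9' or c == '_':
--             state = 1 if state == 0 else (3 if state == 2 else state)
--         elif c == '.' and state == 1:
--             state = 2
--         else:
--             return False
--     return state == 3
-- ===== Notes on version B (the rewrite author's own statement) =====
-- stated objective: alternative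
-- what changed: Replaces split-into-parts, a 37-character set built on every call, and two all() membership scans by a single left-to-right state-machine pass over the lowercased string with early exit.
import Mathlib
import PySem

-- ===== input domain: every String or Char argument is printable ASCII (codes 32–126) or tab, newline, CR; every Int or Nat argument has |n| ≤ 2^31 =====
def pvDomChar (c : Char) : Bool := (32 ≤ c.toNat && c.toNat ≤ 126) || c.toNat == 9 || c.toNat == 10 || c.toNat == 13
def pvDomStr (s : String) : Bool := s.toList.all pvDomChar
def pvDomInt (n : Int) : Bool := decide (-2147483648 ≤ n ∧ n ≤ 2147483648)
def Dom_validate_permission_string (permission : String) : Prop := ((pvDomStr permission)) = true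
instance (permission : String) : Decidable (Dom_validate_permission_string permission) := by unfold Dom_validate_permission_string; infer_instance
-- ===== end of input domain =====

-- B replaces A's split + per-call character-set construction + two membership scans by a
-- single state-machine pass over the lowercased string (objective: alternative decomposition).


-- ===== PORT A =====
-- valid_chars = set('abcdefghijklmnopqrstuvwxyz0123456789_')
def validChars : PySem.Set Char := PySem.Set.ofList "abcdefghijklmnopqrstuvwxyz0123456789_".toList

-- parts = permission.split('.'); the len(parts) != 2 check and the unpacking are the match
def validate_permission_string (permission : String) : Bool :=
  let parts := PySem.Chars.splitOn permission.toList ['.']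
  match parts with
  | [resource, action] =>
    if resource.isEmpty || action.isEmpty then false
    else if !((PySem.Chars.lower resource).all fun c => validChars.contains c) then false
    else if !((PySem.Chars.lower action).all fun c => validChars.contains c) then false
    else true
  | _ => false

-- ===== PORT B =====
-- 'a' <= c <= 'z' or '0' <= c <= '9' or c == '_'
def clsChar (c : Char) : Bool := ('a' ≤ c && c ≤ 'z') || ('0' ≤ c && c ≤ '9') || c == '_'

-- the for-loop with early return: recursion over the remaining characters carrying `state`
def altGo (state : Int) : List Char → Bool
  | [] => state == 3
  | c :: rest =>
    if clsChar c then altGo (if state == 0 then 1 else if state == 2 then 3 else state) rest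
    else if c == '.' && state == 1 then altGo 2 rest
    else false

def validate_permission_string_alt (permission : String) : Bool :=
  altGo 0 (PySem.Str.lower permission).toList

-- ===== PRECONDITION & SPEC =====
def Spec_validate_permission_string (permission : String) (out : Bool) : Prop := out = validate_permission_string_alt permission
instance (permission : String) (out : Bool) : Decidable (Spec_validate_permission_string permission out) := by unfold Spec_validate_permission_string; infer_instance

-- ===== CLAIM (what is proved, stated in full; the proofs are below) =====
def Claim_equal_validate_permission_string : Prop := ∀ (permission : String), Dom_validate_permission_string permission → Spec_validate_permission_string permission (validate_permission_string permission)

-- ===== LEMMAS AND PROOFS =====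

-- proof-side model of permission.split('.'): structural recursion on the characters
def splitDot : List Char → List (List Char)
  | [] => [[]]
  | c :: t =>
    if c = '.' then [] :: splitDot t
    else match splitDot t with
      | h :: r => (c :: h) :: r
      | [] => [[]]
lemma splitDot_ne_nil (t : List Char) : splitDot t ≠ [] := by
  induction t with
  | nil => simp [splitDot]
  | cons c t ih =>
    simp only [splitDot]
    split
    · simp
    · rcases h : splitDot t with _ | ⟨h', r⟩ <;> simp
lemma splitDot_singleton (t a : List Char) (h : splitDot t = [a]) : a = t := by
  induction t generalizing a with
  | nil => simp [splitDot] at h; exact h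
  | cons c t ih =>
    simp only [splitDot] at h
    split at h
    · rcases h' : splitDot t with _ | ⟨h'', r⟩
      · exact absurd h' (splitDot_ne_nil t)
      · rw [h'] at h
        exact absurd (congrArg List.length h) (by simp)
    · rcases h' : splitDot t with _ | ⟨h'', r⟩
      · exact absurd h' (splitDot_ne_nil t)
      · rw [h'] at h
        simp at h
        obtain ⟨h1, h2⟩ := h
        subst h2
        have h3 := ih h'' h'
        subst h3
        exact h1.symm
lemma clsChar_ne_dot (c : Char) (h : clsChar c = true) : c ≠ '.' := by
  intro he; subst he; exact absurd h (by decide)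
lemma splitDot_all_cls (t : List Char) (h : t.all clsChar = true) : splitDot t = [t] := by
  induction t with
  | nil => rfl
  | cons c t ih =>
    simp only [List.all_cons, Bool.and_eq_true] at h
    simp only [splitDot, if_neg (clsChar_ne_dot c h.1), ih h.2]
lemma altGo_three (t : List Char) : altGo 3 t = t.all clsChar := by
  induction t with
  | nil => rfl
  | cons c t ih =>
    simp only [altGo, List.all_cons]
    by_cases h : clsChar c = true <;> simp [h, ih]
lemma altGo_two (t : List Char) : altGo 2 t = (!t.isEmpty && t.all clsChar) := by
  cases t with
  | nil => rfl
  | cons c t =>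
    simp only [altGo, List.all_cons, List.isEmpty_cons]
    by_cases h : clsChar c = true <;> simp [h, altGo_three]
def acore2 : List (List Char) → Bool
  | [h, a] => h.all clsChar && (!a.isEmpty && a.all clsChar)
  | _ => false
lemma altGo_one (t : List Char) : altGo 1 t = acore2 (splitDot t) := by
  induction t with
  | nil => rfl
  | cons c t ih =>
    by_cases hc : clsChar c = true
    · have hd := clsChar_ne_dot c hc
      rcases h : splitDot t with _ | ⟨h', r⟩
      · exact absurd h (splitDot_ne_nil t)
      rw [h] at ih
      simp only [altGo, hc, if_true, splitDot, if_neg hd, h,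
        show (if (1:Int) == 0 then (1:Int) else if (1:Int) == 2 then 3 else 1) = 1 from rfl, ih]
      rcases r with _ | ⟨a, r'⟩
      · simp [acore2]
      rcases r' with _ | _
      · simp [acore2, hc, Bool.and_assoc]
      · simp [acore2]
    · by_cases hd : c = '.'
      · subst hd
        simp only [altGo, hc, if_false, splitDot, if_pos rfl,
          show (('.' == '.') && ((1:Int) == 1)) = true from rfl, if_true]
        rw [altGo_two]
        by_cases hall : t.all clsChar = true
        · rw [splitDot_all_cls t hall]
          simp [acore2, hall]
        · rcases h : splitDot t with _ | ⟨h', r⟩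
          · exact absurd h (splitDot_ne_nil t)
          · rcases r with _ | ⟨a, r'⟩
            · have := splitDot_singleton t h' h
              subst this
              simp [acore2, hall]
            · rcases r' with _ | _ <;> simp [acore2, hall]
      · simp only [altGo, hc, if_false, splitDot, if_neg hd,
          show (c == '.') = false from by simp [hd], Bool.false_and, Bool.false_eq_true]
        rcases h : splitDot t with _ | ⟨h', r⟩
        · exact absurd h (splitDot_ne_nil t)
        · rcases r with _ | ⟨a, r'⟩
          · simp [acore2]
          · rcases r' with _ | _ <;> simp [acore2, hc]
lemma altGo_zero (ls : List Char) :
    altGo 0 ls = (match splitDot ls with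
      | [r, a] => !r.isEmpty && r.all clsChar && (!a.isEmpty && a.all clsChar)
      | _ => false) := by
  cases ls with
  | nil => rfl
  | cons c t =>
    by_cases hc : clsChar c = true
    · have hd := clsChar_ne_dot c hc
      rcases h : splitDot t with _ | ⟨h', r⟩
      · exact absurd h (splitDot_ne_nil t)
      simp only [altGo, hc, if_true, splitDot, if_neg hd, h,
        show (if (0:Int) == 0 then (1:Int) else if (0:Int) == 2 then 3 else 0) = 1 from rfl,
        altGo_one, h]
      rcases r with _ | ⟨a, r'⟩
      · simp [acore2]
      rcases r' with _ | _
      · simp [acore2, hc, Bool.and_assoc]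
      · simp [acore2]
    · by_cases hd : c = '.'
      · subst hd
        simp only [altGo, hc, if_false, splitDot, if_pos rfl,
          show (('.' == '.') && ((0:Int) == 1)) = false from rfl, Bool.false_eq_true]
        rcases h : splitDot t with _ | ⟨h', r⟩
        · exact absurd h (splitDot_ne_nil t)
        · rcases r with _ | ⟨a, r'⟩
          · simp
          · rcases r' with _ | _ <;> simp
      · simp only [altGo, hc, if_false, splitDot, if_neg hd,
          show (c == '.') = false from by simp [hd], Bool.false_and, Bool.false_eq_true]
        rcases h : splitDot t with _ | ⟨h', r⟩
        · exact absurd h (splitDot_ne_nil t)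
        · rcases r with _ | ⟨a, r'⟩
          · simp
          · rcases r' with _ | _ <;> simp [hc]
-- splitOn.go lemma
def consHead (p : List Char) : List (List Char) → List (List Char)
  | h :: r => (p ++ h) :: r
  | [] => [p]
lemma splitOn_go_dot (fuel : Nat) (l cur : List Char) (acc : List (List Char))
    (hf : l.length ≤ fuel) :
    PySem.Chars.splitOn.go ['.'] fuel l cur acc = acc.reverse ++ consHead cur.reverse (splitDot l) := by
  induction fuel generalizing l cur acc with
  | zero =>
    have : l = [] := by cases l <;> simp_all
    subst this
    simp [PySem.Chars.splitOn.go, splitDot, consHead]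
  | succ fuel ih =>
    cases l with
    | nil => simp [PySem.Chars.splitOn.go, splitDot, consHead]
    | cons c rest =>
      simp only [PySem.Chars.splitOn.go]
      by_cases hd : c = '.'
      · subst hd
        rw [if_pos (by simp [List.isPrefixOf])]
        rw [ih _ _ _ (by simpa using Nat.le_of_succ_le_succ (by simpa using hf))]
        rcases h : splitDot rest with _ | ⟨h', r⟩
        · exact absurd h (splitDot_ne_nil rest)
        · simp [splitDot, h, consHead]
      · rw [if_neg (by simp [List.isPrefixOf, Ne.symm hd])]
        rw [ih _ _ _ (by simpa using Nat.le_of_succ_le_succ (by simpa using hf))]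
        rcases h : splitDot rest with _ | ⟨h', r⟩
        · exact absurd h (splitDot_ne_nil rest)
        · simp [splitDot, h, consHead, if_neg hd]
lemma splitOn_eq_splitDot (l : List Char) : PySem.Chars.splitOn l ['.'] = splitDot l := by
  rw [PySem.Chars.splitOn, splitOn_go_dot _ _ _ _ (by omega)]
  rcases h : splitDot l with _ | ⟨h', r⟩
  · exact absurd h (splitDot_ne_nil l)
  · simp [consHead]
lemma lowerChar_eq_dot_iff (c : Char) : PySem.Chars.lowerChar c = '.' ↔ c = '.' := by
  simp only [PySem.Chars.lowerChar]
  split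
  · rename_i h
    simp only [PySem.Chars.isupper, Bool.and_eq_true, decide_eq_true_eq, Char.le_def] at h
    have hv : c.toNat ≤ 90 ∧ 65 ≤ c.toNat := by
      unfold Char.toNat; exact ⟨by exact_mod_cast h.2, by exact_mod_cast h.1⟩
    constructor
    · intro he
      exfalso
      have h2 := congrArg Char.toNat he
      rw [Char.toNat_ofNat, if_pos (by left; omega)] at h2
      have hd : ('.').toNat = 46 := by decide
      omega
    · intro he; subst he
      exact absurd h (by decide)
  · exact Iff.rfl
lemma splitDot_lower (cs : List Char) :
    splitDot (cs.map PySem.Chars.lowerChar) = (splitDot cs).map (List.map PySem.Chars.lowerChar) := by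
  induction cs with
  | nil => rfl
  | cons c t ih =>
    simp only [List.map_cons, splitDot, lowerChar_eq_dot_iff]
    split
    · simp [ih]
    · rw [ih]
      rcases h : splitDot t with _ | ⟨h', r⟩
      · exact absurd h (splitDot_ne_nil t)
      · simp
set_option maxRecDepth 4096 in
lemma contains_eq_cls (c : Char) : validChars.contains c = clsChar c := by
  have hv : validChars = ['a','b','c','d','e','f','g','h','i','j','k','l','m','n','o','p','q','r','s','t','u','v','w','x','y','z','0','1','2','3','4','5','6','7','8','9','_'] := by decide
  rw [PySem.Set.contains, hv, Bool.eq_iff_iff]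
  simp only [clsChar, List.contains_eq_mem, List.mem_cons, List.not_mem_nil, or_false,
    Char.le_def, Char.ext_iff, UInt32.le_iff_toNat_le, UInt32.ext_iff,
    decide_eq_true_eq, Bool.or_eq_true, Bool.and_eq_true, beq_iff_eq,
    show ('a'.val.toNat = 97) from rfl, show ('b'.val.toNat = 98) from rfl, show ('c'.val.toNat = 99) from rfl, show ('d'.val.toNat = 100) from rfl, show ('e'.val.toNat = 101) from rfl, show ('f'.val.toNat = 102) from rfl, show ('g'.val.toNat = 103) from rfl, show ('h'.val.toNat = 104) from rfl, show ('i'.val.toNat = 105) from rfl, show ('j'.val.toNat = 106) from rfl, show ('k'.val.toNat = 107) from rfl, show ('l'.val.toNat = 108) from rfl, show ('m'.val.toNat = 109) from rfl, show ('n'.val.toNat = 110) from rfl, show ('o'.val.toNat = 111) from rfl, show ('p'.val.toNat = 112) from rfl, show ('q'.val.toNat = 113) from rfl, show ('r'.val.toNat = 114) from rfl, show ('s'.val.toNat = 115) from rfl, show ('t'.val.toNat = 116) from rfl, show ('u'.val.toNat = 117) from rfl, show ('v'.val.toNat = 118) from rfl, show ('w'.val.toNat = 119) from rfl, show ('x'.val.toNat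 = 120) from rfl, show ('y'.val.toNat = 121) from rfl, show ('z'.val.toNat = 122) from rfl, show ('0'.val.toNat = 48) from rfl, show ('1'.val.toNat = 49) from rfl, show ('2'.val.toNat = 50) from rfl, show ('3'.val.toNat = 51) from rfl, show ('4'.val.toNat = 52) from rfl, show ('5'.val.toNat = 53) from rfl, show ('6'.val.toNat = 54) from rfl, show ('7'.val.toNat = 55) from rfl, show ('8'.val.toNat = 56) from rfl, show ('9'.val.toNat = 57) from rfl, show ('_'.val.toNat = 95) from rfl]
  omega
-- ===== VERDICT (by name: the statement is the Claim_ definition above) =====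
theorem validate_permission_string_spec : Claim_equal_validate_permission_string := by
  intro permission _
  unfold Spec_validate_permission_string
  have hl : ∀ l : List Char, PySem.Chars.lower l = l.map PySem.Chars.lowerChar := fun _ => rfl
  simp only [validate_permission_string, validate_permission_string_alt,
    splitOn_eq_splitDot, PySem.Str.toList_lower, hl, altGo_zero, splitDot_lower]
  rcases h : splitDot permission.toList with _ | ⟨r, _ | ⟨a, _ | _⟩⟩
  · exact absurd h (splitDot_ne_nil _)
  · simp
  · simp only [List.map_cons, List.map_nil, contains_eq_cls, List.isEmpty_map]
    cases hr : r.isEmpty <;> cases ha : a.isEmpty <;>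
      cases hra : (r.map PySem.Chars.lowerChar).all clsChar <;>
      cases haa : (a.map PySem.Chars.lowerChar).all clsChar <;>
      simp [hr, ha, hra, haa]
  · simp
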